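-- pv_equiv track=rewrite | github.com/sajaldoes/leetcode | Easy/2089.find-target-indices-after-sorting-array.py | targetIndices
-- ===== SOURCE A (Python) =====
-- from typing import List
--
-- def targetIndices(nums: List[int], target: int) -> List[int]:
--     # nums = sorted(nums)
--     # return [i for i in range(len(nums)) if nums[i]==target]
--     #Learned from Discussion
--     index = 0
--     count = 0
--     for n in nums:
--         if n < target:
--             index+=1
--         if n == target:
--             count+=1
--
--     return list(range(index, index+count))
-- ===== SOURCE B (Python) =====
-- def targetIndices(nums, target):
--     s = sorted(nums)
--     return [i for i, v in enumerate(s) if v == target]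
-- ===== Notes on version B (the rewrite author's own statement) =====
-- stated objective: simpler
-- what changed: B sorts a fresh copy of the list and returns the indices whose sorted value equals target (sort-then-scan comprehension), instead of A's two-counter single pass that builds a range.
import Mathlib
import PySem

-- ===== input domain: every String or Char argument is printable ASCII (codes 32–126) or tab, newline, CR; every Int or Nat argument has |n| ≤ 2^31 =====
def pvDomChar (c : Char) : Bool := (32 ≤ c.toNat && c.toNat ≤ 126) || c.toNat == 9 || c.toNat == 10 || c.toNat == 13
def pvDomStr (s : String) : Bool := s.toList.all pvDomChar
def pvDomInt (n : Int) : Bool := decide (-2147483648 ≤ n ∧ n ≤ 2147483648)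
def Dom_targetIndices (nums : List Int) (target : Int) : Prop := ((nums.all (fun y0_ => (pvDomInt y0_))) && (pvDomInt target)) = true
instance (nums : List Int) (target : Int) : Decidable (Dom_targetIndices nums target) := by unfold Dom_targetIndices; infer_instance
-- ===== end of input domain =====

-- B replaces A's two-counter single pass by the canonical sort-then-scan (simpler, not faster).

-- ===== PORT A =====
def targetIndices (nums : List Int) (target : Int) : List Int :=
  let st := nums.foldl (fun (ic : Int × Int) n =>
    let ic := if n < target then (ic.1 + 1, ic.2) else ic
    if n == target then (ic.1, ic.2 + 1) else ic) (0, 0)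
  PySem.List.pyRange st.1 (st.1 + st.2) 1

-- ===== PORT B =====
def targetIndices_alt (nums : List Int) (target : Int) : List Int :=
  let s := PySem.List.sorted nums (fun x => x) false
  ((PySem.List.enumerate s 0).filter (fun p => p.2 == target)).map (·.1)

-- ===== PRECONDITION & SPEC =====
def Spec_targetIndices (nums : List Int) (target : Int) (out : List Int) : Prop := out = targetIndices_alt nums target
instance (nums : List Int) (target : Int) (out : List Int) : Decidable (Spec_targetIndices nums target out) := by unfold Spec_targetIndices; infer_instance

-- ===== CLAIM (what is proved, stated in full; the proofs are below) =====
def Claim_equal_targetIndices : Prop := ∀ (nums : List Int) (target : Int), Dom_targetIndices nums target → Spec_targetIndices nums target (targetIndices nums target)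

-- ===== LEMMAS AND PROOFS =====

-- A's fold computes (countP (· < t), count t).
theorem foldA_eq (t : Int) (nums : List Int) : ∀ (i c : Int),
    nums.foldl (fun (ic : Int × Int) n =>
      let ic := if n < t then (ic.1 + 1, ic.2) else ic
      if n == t then (ic.1, ic.2 + 1) else ic) (i, c)
    = (i + (nums.countP (fun n => n < t) : Int), c + (nums.count t : Int)) := by
  induction nums with
  | nil => intro i c; simp
  | cons a s ih =>
    intro i c
    simp only [beq_iff_eq] at ih ⊢
    by_cases h1 : a < t <;> by_cases h2 : a = t <;>
      simp [h1, h2, ih, Prod.ext_iff] <;> omega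

-- On a sorted list, the enumerate-filter comprehension is a contiguous range.
theorem filt_eq (t : Int) : ∀ (s : List Int), s.Pairwise (· ≤ ·) → ∀ (k : Int),
    ((PySem.List.enumerate s k).filter (fun p => p.2 == t)).map (·.1)
    = PySem.List.pyRange (k + (s.countP (fun n => n < t) : Int))
        (k + (s.countP (fun n => n < t) : Int) + (s.count t : Int)) 1 := by
  intro s
  induction s with
  | nil =>
    intro _ k
    simp [PySem.List.enumerate_nil, PySem.List.pyRange_one_eq_nil le_rfl]
  | cons a s ih =>
    intro hp k
    have ha : ∀ x ∈ s, a ≤ x := fun x hx => (List.pairwise_cons.mp hp).1 x hx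
    have hs : s.Pairwise (· ≤ ·) := (List.pairwise_cons.mp hp).2
    rw [PySem.List.enumerate_cons]
    rcases lt_trichotomy a t with h | h | h
    · -- a < t : head filtered out
      have hne : (a == t) = false := by simp; omega
      simp only [List.filter_cons, hne, Bool.false_eq_true, if_false,
        List.countP_cons, List.count_cons]
      rw [ih hs (k + 1)]
      simp [h]
      congr 1 <;> push_cast <;> ring
    · -- a = t : head kept, nothing below t in s
      subst h
      have hcp : s.countP (fun n => n < a) = 0 := by
        rw [List.countP_eq_zero]
        intro x hx; simpa using not_lt.mpr (ha x hx)
      simp only [List.filter_cons, BEq.rfl, if_true, List.countP_cons, List.count_cons]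
      rw [List.map_cons, ih hs (k + 1)]
      have hC : (0:Int) ≤ (s.count a : Int) := by positivity
      simp only [hcp, lt_irrefl, decide_false, Bool.false_eq_true, if_false,
        Nat.cast_zero, add_zero, Nat.cast_add, Nat.cast_one]
      rw [← PySem.List.pyRange_one_cons (by omega)]
      congr 1
      ring
    · -- t < a : nothing equals t anywhere
      have hne : (a == t) = false := by simp; omega
      have hcp : s.countP (fun n => n < t) = 0 := by
        rw [List.countP_eq_zero]
        intro x hx
        have := ha x hx; simp; omega
      have hc : s.count t = 0 := by
        rw [List.count_eq_zero]
        intro hx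
        have := ha t hx; omega
      have hcpa : (a::s).countP (fun n => n < t) = 0 := by
        simp [List.countP_cons, hcp]; omega
      have hca : (a::s).count t = 0 := by
        simp [List.count_cons, hc]; omega
      simp only [List.filter_cons, hne, Bool.false_eq_true, if_false]
      rw [ih hs (k + 1)]
      simp [hcp, hc, hcpa, hca, PySem.List.pyRange_one_eq_nil le_rfl]

-- ===== VERDICT (by name: the statement is the Claim_ definition above) =====
theorem targetIndices_spec : Claim_equal_targetIndices := by
  intro nums t _
  unfold Spec_targetIndices targetIndices targetIndices_alt
  have hperm : (PySem.List.sorted nums (fun x => x) false).Perm nums :=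
    PySem.List.sorted_perm nums (fun x => x) false
  have hpair : (PySem.List.sorted nums (fun x => x) false).Pairwise (· ≤ ·) := by
    have := PySem.List.sorted_pairwise nums (fun x => x)
    simpa using this
  rw [foldA_eq, filt_eq t _ hpair 0]
  rw [hperm.countP_eq, hperm.count_eq]
  simp
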